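-- pv_equiv track=rewrite | github.com/DaveM303/affl-discord-bot | commands/free_agency_commands.py | _split_field_content
-- ===== SOURCE A (Python) =====
-- def _split_field_content(lines, field_name, max_length=1000):
--     """Split content into multiple fields if it exceeds Discord's limit"""
--     chunks = []
--     current_chunk = []
--     current_length = 0
--
--     for line in lines:
--         line_length = len(line) + 1  # +1 for newline
--         if current_length + line_length > max_length and current_chunk:  # Leave buffer
--             # Add current chunk
--             chunk_num = len(chunks) + 1
--             name = f"{field_name} (Part {chunk_num})" if chunks else field_name
--             chunks.append((name, "\n".join(current_chunk)))
--             current_chunk = []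
--             current_length = 0
--
--         current_chunk.append(line)
--         current_length += line_length
--
--     # Add remaining
--     if current_chunk:
--         chunk_num = len(chunks) + 1
--         name = f"{field_name} (Part {chunk_num})" if chunks else field_name
--         chunks.append((name, "\n".join(current_chunk)))
--
--     return chunks
-- ===== SOURCE B (Python) =====
-- def _split_field_content(lines, field_name, max_length=1000):
--     """Split content into multiple fields if it exceeds Discord's limit"""
--     # Pack one maximal group at a time from a reversed stack, then name groups by index.
--     stack = lines[::-1]
--     groups = []
--     while stack:
--         total = len(stack[-1]) + 1
--         group = [stack.pop()]
--         while stack and total + len(stack[-1]) + 1 <= max_length: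
--             total += len(stack[-1]) + 1
--             group.append(stack.pop())
--         groups.append(group)
--     return [
--         (field_name if i == 0 else f"{field_name} (Part {i + 1})", "\n".join(g))
--         for i, g in enumerate(groups)
--     ]
-- ===== Notes on version B (the rewrite author's own statement) =====
-- stated objective: alternative
-- what changed: B replaces A's single-pass flush-accumulator loop with an outer per-group loop that pops lines off a reversed stack (an inner loop packs one maximal group at a time) and a separate final pass that names each group from its index.
import Mathlib
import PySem

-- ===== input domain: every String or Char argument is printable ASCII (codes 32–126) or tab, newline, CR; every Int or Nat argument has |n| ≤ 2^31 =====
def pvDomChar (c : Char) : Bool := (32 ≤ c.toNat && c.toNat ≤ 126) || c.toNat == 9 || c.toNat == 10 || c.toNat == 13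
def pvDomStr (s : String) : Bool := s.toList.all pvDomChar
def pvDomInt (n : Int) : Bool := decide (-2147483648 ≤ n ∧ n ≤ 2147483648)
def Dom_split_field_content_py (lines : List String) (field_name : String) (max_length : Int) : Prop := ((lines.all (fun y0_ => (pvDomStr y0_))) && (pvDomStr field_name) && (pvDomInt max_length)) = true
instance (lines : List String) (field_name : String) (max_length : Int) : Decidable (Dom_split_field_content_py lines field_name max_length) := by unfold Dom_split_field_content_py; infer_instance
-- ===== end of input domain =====

-- B packs one maximal group at a time (outer loop per group, inner packing loop) and names
-- groups in a separate index-driven pass; objective: alternative decomposition, same cost.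

-- ===== PORT A =====
def pvStepA (field_name : String) (max_length : Int)
    (st : List (String × String) × List String × Int) (line : String) :
    List (String × String) × List String × Int :=
  let ll := PySem.Str.len line + 1
  let st :=
    if st.2.2 + ll > max_length ∧ st.2.1 ≠ [] then
      let name := if st.1 ≠ [] then
          field_name ++ " (Part " ++ PySem.Int.toStr ((st.1.length : Int) + 1) ++ ")"
        else field_name
      (st.1 ++ [(name, PySem.Str.join "\n" st.2.1)], ([] : List String), (0 : Int))
    else st
  (st.1, st.2.1 ++ [line], st.2.2 + ll)

def split_field_content_py (lines : List String) (field_name : String) (max_length : Int) :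
    List (String × String) :=
  let st := lines.foldl (pvStepA field_name max_length) ([], [], 0)
  if st.2.1 ≠ [] then
    st.1 ++ [(if st.1 ≠ [] then
        field_name ++ " (Part " ++ PySem.Int.toStr ((st.1.length : Int) + 1) ++ ")"
      else field_name, PySem.Str.join "\n" st.2.1)]
  else st.1

-- ===== PORT B =====
-- Inner packing loop: extend the current group while the next line still fits.
-- (Source B pops lines off a reversed stack; popping the stack's top is consuming the head of
-- the original list, which is how it is transcribed here — same lines in the same order.)
def pvSpan (max_length : Int) (total : Int) : List String → List String × List String
  | [] => ([], [])
  | l :: rest =>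
    if total + (PySem.Str.len l + 1) ≤ max_length then
      let p := pvSpan max_length (total + (PySem.Str.len l + 1)) rest
      (l :: p.1, p.2)
    else ([], l :: rest)

theorem pvSpan_snd_length (max_length total : Int) (xs : List String) :
    (pvSpan max_length total xs).2.length ≤ xs.length := by
  induction xs generalizing total with
  | nil => simp [pvSpan]
  | cons l rest ih =>
    simp only [pvSpan]
    split
    · exact Nat.le_succ_of_le (ih _)
    · exact Nat.le_refl _

-- Outer loop: one iteration per group.
def pvGroups (max_length : Int) : List String → List (List String)
  | [] => []
  | l :: rest =>
    let p := pvSpan max_length (PySem.Str.len l + 1) rest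
    (l :: p.1) :: pvGroups max_length p.2
termination_by xs => xs.length
decreasing_by
  simpa using Nat.lt_succ_of_le (pvSpan_snd_length _ _ rest)

def pvFmtName (field_name : String) (i : Int) : String :=
  if i == 0 then field_name else field_name ++ " (Part " ++ PySem.Int.toStr (i + 1) ++ ")"

def split_field_content_py_alt (lines : List String) (field_name : String) (max_length : Int) :
    List (String × String) :=
  (PySem.List.enumerate (pvGroups max_length lines) 0).map
    (fun p => (pvFmtName field_name p.1, PySem.Str.join "\n" p.2))

-- ===== PRECONDITION & SPEC =====
def Spec_split_field_content_py (lines : List String) (field_name : String) (max_length : Int) (out : List (String × String)) : Prop := out = split_field_content_py_alt lines field_name max_length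
instance (lines : List String) (field_name : String) (max_length : Int) (out : List (String × String)) : Decidable (Spec_split_field_content_py lines field_name max_length out) := by unfold Spec_split_field_content_py; infer_instance

-- ===== CLAIM =====
def Claim_equal_split_field_content_py : Prop := ∀ (lines : List String) (field_name : String) (max_length : Int), Dom_split_field_content_py lines field_name max_length → Spec_split_field_content_py lines field_name max_length (split_field_content_py lines field_name max_length)

-- ===== LEMMAS AND PROOFS =====
-- Proof-only intermediate: A's loop with the naming stripped out.
def pvStepB (max_length : Int)
    (st : List (List String) × List String × Int) (line : String) :
    List (List String) × List String × Int :=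
  let ll := PySem.Str.len line + 1
  let st :=
    if st.2.2 + ll > max_length ∧ st.2.1 ≠ [] then
      (st.1 ++ [st.2.1], ([] : List String), (0 : Int))
    else st
  (st.1, st.2.1 ++ [line], st.2.2 + ll)

def pvFmt (field_name : String) (gs : List (List String)) : List (String × String) :=
  (PySem.List.enumerate gs 0).map (fun p => (pvFmtName field_name p.1, PySem.Str.join "\n" p.2))

def pvFinishB (st : List (List String) × List String × Int) : List (List String) :=
  if st.2.1 ≠ [] then st.1 ++ [st.2.1] else st.1

theorem pvFmt_append_singleton (fn : String) (gs : List (List String)) (g : List String) :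
    pvFmt fn (gs ++ [g]) = pvFmt fn gs ++
      [(if pvFmt fn gs ≠ [] then fn ++ " (Part " ++ PySem.Int.toStr (((pvFmt fn gs).length : Int) + 1) ++ ")" else fn,
        PySem.Str.join "\n" g)] := by
  by_cases h : gs = []
  · subst h; simp [pvFmt, PySem.List.enumerate, pvFmtName]
  · have henum : PySem.List.enumerate gs 0 ≠ [] := by
      cases gs with
      | nil => exact absurd rfl h
      | cons a t => simp [PySem.List.enumerate_cons]
    have hl : ((gs.length : Int) = 0) = False := by
      simp [List.length_eq_zero_iff, h]
    simp [pvFmt, PySem.List.enumerate_append, pvFmtName,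
      PySem.List.length_enumerate, henum]
    intro hg; exact absurd hg h

theorem pvStep_one (fn : String) (ml : Int)
    (gs : List (List String)) (cur : List String) (clen : Int) (l : String) :
    pvStepA fn ml (pvFmt fn gs, cur, clen) l =
      (fun st => (pvFmt fn st.1, st.2.1, st.2.2)) (pvStepB ml (gs, cur, clen) l) := by
  simp only [pvStepA, pvStepB]
  by_cases hc : clen + (PySem.Str.len l + 1) > ml ∧ cur ≠ []
  · rw [if_pos hc, if_pos hc]
    simp [pvFmt_append_singleton]
  · rw [if_neg hc, if_neg hc]

theorem pvStep_comm (fn : String) (ml : Int) (lines : List String)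
    (gs : List (List String)) (cur : List String) (clen : Int) :
    lines.foldl (pvStepA fn ml) (pvFmt fn gs, cur, clen) =
      (fun st => (pvFmt fn st.1, st.2.1, st.2.2)) (lines.foldl (pvStepB ml) (gs, cur, clen)) := by
  induction lines generalizing gs cur clen with
  | nil => rfl
  | cons l rest ih =>
    rw [List.foldl_cons, List.foldl_cons, pvStep_one]
    obtain ⟨gs', cur', clen'⟩ := pvStepB ml (gs, cur, clen) l
    exact ih gs' cur' clen'

-- The flush-accumulator loop computes the same groups as the per-group packing recursion.
theorem pvFold_groups (ml : Int) (lines : List String) :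
    ∀ (gs : List (List String)) (cur : List String) (clen : Int), cur ≠ [] →
    pvFinishB (lines.foldl (pvStepB ml) (gs, cur, clen)) =
      gs ++ (cur ++ (pvSpan ml clen lines).1) :: pvGroups ml (pvSpan ml clen lines).2 := by
  induction lines with
  | nil =>
    intro gs cur clen hcur
    simp [pvFinishB, pvSpan, pvGroups, hcur]
  | cons l rest ih =>
    intro gs cur clen hcur
    rw [List.foldl_cons]
    by_cases h : clen + (PySem.Str.len l + 1) ≤ ml
    · have hstep : pvStepB ml (gs, cur, clen) l = (gs, cur ++ [l], clen + (PySem.Str.len l + 1)) := by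
        simp only [pvStepB]
        rw [if_neg (by intro ⟨hgt, _⟩; omega)]
      rw [hstep, ih _ _ _ (by simp)]
      simp only [pvSpan, if_pos h]
      simp
    · have hstep : pvStepB ml (gs, cur, clen) l = (gs ++ [cur], [l], PySem.Str.len l + 1) := by
        simp only [pvStepB]
        rw [if_pos ⟨by omega, hcur⟩]
        simp
      rw [hstep, ih _ _ _ (by simp)]
      simp only [pvSpan, if_neg h]
      rw [pvGroups]
      simp

-- ===== VERDICT =====
theorem split_field_content_py_spec : Claim_equal_split_field_content_py := by
  intro lines fn ml _
  show split_field_content_py lines fn ml = split_field_content_py_alt lines fn ml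
  have halt : split_field_content_py_alt lines fn ml = pvFmt fn (pvGroups ml lines) := rfl
  have hA : split_field_content_py lines fn ml =
      pvFmt fn (pvFinishB (lines.foldl (pvStepB ml) ([], [], 0))) := by
    unfold split_field_content_py
    have h := pvStep_comm fn ml lines [] [] 0
    have h0 : pvFmt fn [] = [] := by simp [pvFmt, PySem.List.enumerate]
    rw [h0] at h
    rw [h]
    obtain ⟨gs, cur, clen⟩ := lines.foldl (pvStepB ml) ([], [], 0)
    by_cases hcur : cur = []
    · simp [hcur, pvFinishB]
    · simp only [pvFinishB, hcur, ne_eq, not_false_eq_true, if_pos]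
      exact (pvFmt_append_singleton fn gs cur).symm
  rw [hA, halt]
  congr 1
  cases lines with
  | nil => simp [pvFinishB, pvGroups]
  | cons l rest =>
    rw [List.foldl_cons]
    have hstep : pvStepB ml (([] : List (List String)), ([] : List String), (0 : Int)) l
        = ([], [l], PySem.Str.len l + 1) := by
      simp [pvStepB]
    rw [hstep, pvFold_groups ml rest [] [l] _ (by simp)]
    rw [pvGroups]
    simp
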